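-- pv_equiv track=rewrite | github.com/mayosupport/Advent-Of-Code | 2024/day4/pt1.py | search_in_direction
-- ===== SOURCE A (Python) =====
-- def search_in_direction(puzzle, dirx, diry, word, col, row):
--     word_len = len(word)
--
--     for x in range(word_len):
--         new_i, new_j = row + x * dirx, col + x * diry
--         # Check if we're going out of bounds or if the character doesn't match
--         if not (0 <= new_i < len(puzzle) and 0 <= new_j < len(puzzle[0])):
--             return False
--         if puzzle[new_i][new_j] != word[x]:
--             return False
--     return True
-- ===== SOURCE B (Python) =====
-- def search_in_direction(puzzle, dirx, diry, word, col, row):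
--     n = len(word)
--     if n == 0:
--         return True
--     rows = len(puzzle)
--     cols = len(puzzle[0]) if puzzle else 0
--     end_i, end_j = row + (n - 1) * dirx, col + (n - 1) * diry
--     # a constant-step line is fully inside a rectangle iff its endpoints are
--     if not (0 <= row < rows and 0 <= col < cols and 0 <= end_i < rows and 0 <= end_j < cols):
--         return False
--     return ''.join(puzzle[row + x * dirx][col + x * diry] for x in range(n)) == word
-- ===== Notes on version B (the rewrite author's own statement) =====
-- stated objective: simpler
-- what changed: B replaces A's per-step bounds-checked scan by one endpoint bounds test (a constant-step line lies in the rectangle iff its endpoints do) followed by building the traversed string and comparing it to word.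
-- outside the precondition, e.g. on search_in_direction(['ab', 'c'], 1, 1, 'xz', 0, 0): A returns False, B raises IndexError
import Mathlib
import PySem

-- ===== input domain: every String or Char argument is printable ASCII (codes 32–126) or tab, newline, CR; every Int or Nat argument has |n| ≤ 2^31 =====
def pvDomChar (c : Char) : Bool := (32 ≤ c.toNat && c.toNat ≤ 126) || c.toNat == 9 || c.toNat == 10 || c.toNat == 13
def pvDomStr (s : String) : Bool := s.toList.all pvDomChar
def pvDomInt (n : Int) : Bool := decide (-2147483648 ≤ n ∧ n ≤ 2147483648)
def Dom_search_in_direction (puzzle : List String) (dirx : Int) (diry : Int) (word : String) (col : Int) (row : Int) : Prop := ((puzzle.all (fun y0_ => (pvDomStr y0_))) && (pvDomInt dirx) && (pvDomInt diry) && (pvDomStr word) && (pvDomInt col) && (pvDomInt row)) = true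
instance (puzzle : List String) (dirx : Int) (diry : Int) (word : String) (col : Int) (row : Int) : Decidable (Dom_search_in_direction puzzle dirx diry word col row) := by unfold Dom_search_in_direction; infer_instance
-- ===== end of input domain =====

-- B replaces A's per-step bounds-checked scan by a single endpoint bounds test plus
-- build-the-traversed-string-and-compare; same cost, simpler decomposition.

-- ===== PORT A =====
-- puzzle[i][j]: the .getD defaults are never reached on inputs admitted by Pre_ (bounds are checked first)
def pvCell (puzzle : List String) (i j : Int) : Char :=
  (PySem.Str.pyGet? ((PySem.List.pyGet? puzzle i).getD "") j).getD ' '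

-- the per-step bounds test `0 <= new_i < len(puzzle) and 0 <= new_j < len(puzzle[0])`
def pvInB (puzzle : List String) (dirx : Int) (diry : Int) (col : Int) (row : Int) (x : Nat) : Bool :=
  decide (0 ≤ row + (x : Int) * dirx ∧ row + (x : Int) * dirx < (puzzle.length : Int) ∧
          0 ≤ col + (x : Int) * diry ∧ col + (x : Int) * diry < ((puzzle.headI).toList.length : Int))

-- A's for-loop over `range(word_len)`, returning False on the first OOB step or mismatch
def searchLoopA (puzzle : List String) (dirx : Int) (diry : Int) (wl : List Char) (col : Int) (row : Int) : List Nat → Bool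
  | [] => true
  | x :: xs =>
    if pvInB puzzle dirx diry col row x then
      if pvCell puzzle (row + (x : Int) * dirx) (col + (x : Int) * diry) ≠ wl[x]?.getD ' ' then false
      else searchLoopA puzzle dirx diry wl col row xs
    else false

def search_in_direction (puzzle : List String) (dirx : Int) (diry : Int) (word : String) (col : Int) (row : Int) : Bool :=
  searchLoopA puzzle dirx diry word.toList col row (List.range word.toList.length)

-- ===== PORT B =====
def search_in_direction_alt (puzzle : List String) (dirx : Int) (diry : Int) (word : String) (col : Int) (row : Int) : Bool :=
  let wl := word.toList
  let n := wl.length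
  if n = 0 then true
  else
    let rows : Int := puzzle.length
    let cols : Int := (puzzle.headI).toList.length      -- len(puzzle[0]) if puzzle else 0
    let endI : Int := row + ((n : Int) - 1) * dirx
    let endJ : Int := col + ((n : Int) - 1) * diry
    if 0 ≤ row ∧ row < rows ∧ 0 ≤ col ∧ col < cols ∧
       0 ≤ endI ∧ endI < rows ∧ 0 ≤ endJ ∧ endJ < cols then
      decide (((List.range n).map (fun (x : Nat) => pvCell puzzle (row + (x : Int) * dirx) (col + (x : Int) * diry))) = wl)
    else false

-- ===== PRECONDITION & SPEC =====
-- Pre_ excludes inputs whose scan line reaches (inside the rectangle measured by row 0's width) a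
-- cell past the end of its own, shorter, row: there A raises IndexError (or, if a mismatch happens
-- first, returns a value B's string-building pass cannot reach either).
def Pre_search_in_direction (puzzle : List String) (dirx : Int) (diry : Int) (word : String) (col : Int) (row : Int) : Prop :=
  ∀ x ∈ List.range word.toList.length,
    (0 ≤ row + (x : Int) * dirx ∧ row + (x : Int) * dirx < (puzzle.length : Int) ∧
     0 ≤ col + (x : Int) * diry ∧ col + (x : Int) * diry < ((puzzle.headI).toList.length : Int)) →
    col + (x : Int) * diry < ((((PySem.List.pyGet? puzzle (row + (x : Int) * dirx)).getD "").toList.length : Int))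
instance (puzzle : List String) (dirx : Int) (diry : Int) (word : String) (col : Int) (row : Int) : Decidable (Pre_search_in_direction puzzle dirx diry word col row) := by unfold Pre_search_in_direction; infer_instance

def pvWitness_search_in_direction : List String × Int × Int × String × Int × Int := (["AB", "CD"], 1, 1, "AD", 0, 0)

def Spec_search_in_direction (puzzle : List String) (dirx : Int) (diry : Int) (word : String) (col : Int) (row : Int) (out : Bool) : Prop := out = search_in_direction_alt puzzle dirx diry word col row
instance (puzzle : List String) (dirx : Int) (diry : Int) (word : String) (col : Int) (row : Int) (out : Bool) : Decidable (Spec_search_in_direction puzzle dirx diry word col row out) := by unfold Spec_search_in_direction; infer_instance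

-- ===== CLAIM (what is proved, stated in full; the proofs are below) =====
def Claim_equal_search_in_direction : Prop := ∀ (puzzle : List String) (dirx : Int) (diry : Int) (word : String) (col : Int) (row : Int), Dom_search_in_direction puzzle dirx diry word col row → Pre_search_in_direction puzzle dirx diry word col row → Spec_search_in_direction puzzle dirx diry word col row (search_in_direction puzzle dirx diry word col row)

-- ===== LEMMAS AND PROOFS =====
theorem pvWitness_ok : Dom_search_in_direction (pvWitness_search_in_direction.1) (pvWitness_search_in_direction.2.1) (pvWitness_search_in_direction.2.2.1) (pvWitness_search_in_direction.2.2.2.1) (pvWitness_search_in_direction.2.2.2.2.1) (pvWitness_search_in_direction.2.2.2.2.2) ∧ Pre_search_in_direction (pvWitness_search_in_direction.1) (pvWitness_search_in_direction.2.1) (pvWitness_search_in_direction.2.2.1) (pvWitness_search_in_direction.2.2.2.1) (pvWitness_search_in_direction.2.2.2.2.1) (pvWitness_search_in_direction.2.2.2.2.2) := by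
  constructor <;> decide

-- if some step index in l is out of bounds, A's loop returns false
theorem loop_false (puzzle : List String) (dirx diry : Int) (wl : List Char) (col row : Int)
    (l : List Nat) (x : Nat) (hx : x ∈ l) (hb : pvInB puzzle dirx diry col row x = false) :
    searchLoopA puzzle dirx diry wl col row l = false := by
  induction l with
  | nil => cases hx
  | cons y ys ih =>
    rcases List.mem_cons.mp hx with rfl | hmem
    · simp [searchLoopA, hb]
    · simp only [searchLoopA]
      split
      · split
        · rfl
        · exact ih hmem
      · rfl

-- if every step index in l is in bounds, A's loop is the conjunction of the character matches
theorem loop_all (puzzle : List String) (dirx diry : Int) (wl : List Char) (col row : Int)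
    (l : List Nat) (hall : ∀ x ∈ l, pvInB puzzle dirx diry col row x = true) :
    searchLoopA puzzle dirx diry wl col row l =
      l.all (fun x => pvCell puzzle (row + (x : Int) * dirx) (col + (x : Int) * diry) == wl[x]?.getD ' ') := by
  induction l with
  | nil => rfl
  | cons y ys ih =>
    have hy := hall y (List.mem_cons_self ..)
    simp only [searchLoopA, hy, if_true, List.all_cons]
    by_cases hc : pvCell puzzle (row + (y : Int) * dirx) (col + (y : Int) * diry) = wl[y]?.getD ' '
    · rw [if_neg (fun h => h hc)]
      simp [hc, ih (fun x hx => hall x (List.mem_cons_of_mem _ hx))]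
    · rw [if_pos hc]
      simp [hc]

-- the traversed string equals the word iff every character matches
theorem map_range_eq_iff (g : Nat → Char) (wl : List Char) (n : Nat) (h : wl.length = n) :
    ((List.range n).map g = wl) ↔ ∀ x < n, g x = wl[x]?.getD ' ' := by
  constructor
  · intro he x hx
    have hgc := congrArg (fun l => l[x]?.getD ' ') he
    simpa [List.getElem?_map, List.getElem?_range, hx] using hgc
  · intro hall
    apply List.ext_getElem
    · simp [h]
    · intro i h1 h2
      simp only [List.getElem_map, List.getElem_range]
      rw [hall i (by simpa using h1)]
      simp [List.getElem?_eq_getElem h2]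

-- a constant-step line is inside [0,R) iff its endpoints are
theorem seg_bounds (a d R : Int) (n x : Nat) (hx : x < n)
    (h0 : 0 ≤ a) (h0' : a < R) (hn : 0 ≤ a + ((n : Int) - 1) * d) (hn' : a + ((n : Int) - 1) * d < R) :
    0 ≤ a + (x : Int) * d ∧ a + (x : Int) * d < R := by
  have hxn : (x : Int) ≤ (n : Int) - 1 := by
    have : (x : Int) < (n : Int) := by exact_mod_cast hx
    omega
  have hx0 : (0 : Int) ≤ (x : Int) := Int.natCast_nonneg x
  by_cases hd : 0 ≤ d
  · have h1 : (x : Int) * d ≤ ((n : Int) - 1) * d := mul_le_mul_of_nonneg_right hxn hd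
    have h2 : 0 ≤ (x : Int) * d := mul_nonneg hx0 hd
    constructor <;> linarith
  · have hd' : d ≤ 0 := by omega
    have h1 : ((n : Int) - 1) * d ≤ (x : Int) * d := mul_le_mul_of_nonpos_right hxn hd'
    have h2 : (x : Int) * d ≤ 0 := mul_nonpos_of_nonneg_of_nonpos hx0 hd'
    constructor <;> linarith

-- ===== VERDICT (by name: the statement is the Claim_ definition above) =====
theorem search_in_direction_spec : Claim_equal_search_in_direction := by
  intro puzzle dirx diry word col row _hdom _hpre
  unfold Spec_search_in_direction search_in_direction search_in_direction_alt
  generalize word.toList = wl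
  show searchLoopA puzzle dirx diry wl col row (List.range wl.length) =
    if wl.length = 0 then true
    else
      if 0 ≤ row ∧ row < (puzzle.length : Int) ∧ 0 ≤ col ∧ col < ((puzzle.headI).toList.length : Int) ∧
         0 ≤ row + ((wl.length : Int) - 1) * dirx ∧ row + ((wl.length : Int) - 1) * dirx < (puzzle.length : Int) ∧
         0 ≤ col + ((wl.length : Int) - 1) * diry ∧ col + ((wl.length : Int) - 1) * diry < ((puzzle.headI).toList.length : Int) then
        decide (((List.range wl.length).map (fun (x : Nat) => pvCell puzzle (row + (x : Int) * dirx) (col + (x : Int) * diry))) = wl)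
      else false
  by_cases h0 : wl.length = 0
  · simp [h0, searchLoopA]
  · rw [if_neg h0]
    have hpos : 0 < wl.length := Nat.pos_of_ne_zero h0
    have hn1 : (((wl.length - 1 : Nat)) : Int) = (wl.length : Int) - 1 := by
      push_cast [Nat.cast_sub hpos]; ring
    by_cases hb : 0 ≤ row ∧ row < (puzzle.length : Int) ∧ 0 ≤ col ∧ col < ((puzzle.headI).toList.length : Int) ∧
        0 ≤ row + ((wl.length : Int) - 1) * dirx ∧ row + ((wl.length : Int) - 1) * dirx < (puzzle.length : Int) ∧
        0 ≤ col + ((wl.length : Int) - 1) * diry ∧ col + ((wl.length : Int) - 1) * diry < ((puzzle.headI).toList.length : Int)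
    · rw [if_pos hb]
      obtain ⟨b1, b2, b3, b4, b5, b6, b7, b8⟩ := hb
      have hall : ∀ x ∈ List.range wl.length, pvInB puzzle dirx diry col row x = true := by
        intro x hx
        have hxn : x < wl.length := List.mem_range.mp hx
        have hi := seg_bounds row dirx (puzzle.length : Int) wl.length x hxn b1 b2 b5 b6
        have hj := seg_bounds col diry ((puzzle.headI).toList.length : Int) wl.length x hxn b3 b4 b7 b8
        exact decide_eq_true ⟨hi.1, hi.2, hj.1, hj.2⟩
      rw [loop_all puzzle dirx diry wl col row _ hall]
      rw [Bool.eq_iff_iff]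
      simp only [List.all_eq_true, List.mem_range, beq_iff_eq, decide_eq_true_eq]
      exact (map_range_eq_iff (fun x => pvCell puzzle (row + (x : Int) * dirx) (col + (x : Int) * diry)) wl wl.length rfl).symm
    · rw [if_neg hb]
      -- some endpoint is out of bounds, hence some step of the scan is
      have hex : ∃ x ∈ List.range wl.length, pvInB puzzle dirx diry col row x = false := by
        by_contra hc
        have hc' : ∀ x ∈ List.range wl.length, pvInB puzzle dirx diry col row x = true := by
          intro x hx
          cases hpv : pvInB puzzle dirx diry col row x
          · exact absurd ⟨x, hx, hpv⟩ hc
          · rfl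
        apply hb
        have hstart := of_decide_eq_true (hc' 0 (List.mem_range.mpr hpos))
        have hend := of_decide_eq_true (hc' (wl.length - 1) (List.mem_range.mpr (by omega)))
        rw [hn1] at hend
        simp only [Nat.cast_zero, zero_mul, add_zero] at hstart
        exact ⟨hstart.1, hstart.2.1, hstart.2.2.1, hstart.2.2.2, hend.1, hend.2.1, hend.2.2.1, hend.2.2.2⟩
      obtain ⟨x, hx, hfalse⟩ := hex
      exact loop_false puzzle dirx diry wl col row _ x hx hfalse
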